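/- GENERATED by mk_final_copies.py from the proof of the farm's unit `start_decoder.C6e` (farm:start_decoder.C6e.1: Proof.lean) as the
   re-elaboration sweep compiled it — do not edit. -/
import Asan.CheckWalk
import Vorbis.Spec.Units.start_decoder_C6e
import Vorbis.Spec.StartDecoderCarry
import Vorbis.Spec.StartDecoderC7
import Vorbis.Spec.Worked.start_decoder_C6e_Lemmas

open X86 X86.User Asan Vorbis Vorbis.Spec Vorbis.Spec.StartDecoder

set_option maxRecDepth 100000
set_option maxHeartbeats 4000000

namespace Vorbis.Spec.start_decoder_C6e

/-- A window of the success arm of segment C6e: the stack below the steady rsp (the pushed return addresses of the two check calls),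
or inside `f->setup_temp_memory_required` `[f + 16, f + 20)` (the conditional store 0x1146ce of the `size` statistic). -/
def C6eWin (g : Ghost) (w : Span) : Prop :=
  (g.R - 408 ≤ w.lo ∧ w.hi ≤ g.R) ∨ (g.f + 16 ≤ w.lo ∧ w.hi ≤ g.f + 20)

/-- **The fields of the book read the same when the struct's bytes are kept** (the success arm of C6e writes the stack and `*f` only). -/
theorem c6e_fields {m m' : Mem} {c : Nat} (hk : (⟨c, 2120⟩ : Block).Kept m m') :
    Codebook.dimensions m' c = Codebook.dimensions m c ∧ Codebook.entries m' c = Codebook.entries m c ∧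
      Codebook.codeword_lengths m' c = Codebook.codeword_lengths m c ∧ Codebook.sparse m' c = Codebook.sparse m c ∧
      Codebook.sorted_entries m' c = Codebook.sorted_entries m c ∧ Codebook.codewords m' c = Codebook.codewords m c ∧
      (Fresh5 m c → Fresh5 m' c) := by
  have e_dim : Codebook.dimensions m' c = Codebook.dimensions m c := by
    simp only [vacc, voff]
    exact hk.i32 _ (by simp only []; omega) (by simp only []; omega)
  have e_ent : Codebook.entries m' c = Codebook.entries m c := by
    simp only [vacc, voff]
    exact hk.i32 _ (by simp only []; omega) (by simp only []; omega)
  have e_cl : Codebook.codeword_lengths m' c = Codebook.codeword_lengths m c := by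
    simp only [vacc, voff]
    exact hk.u64 _ (by simp only []; omega) (by simp only []; omega)
  have e_sp : Codebook.sparse m' c = Codebook.sparse m c := by
    simp only [vacc, voff]
    exact hk.u8 _ (by simp only []; omega) (by simp only []; omega)
  have e_lt : Codebook.lookup_type m' c = Codebook.lookup_type m c := by
    simp only [vacc, voff]
    exact hk.u8 _ (by simp only []; omega) (by simp only []; omega)
  have e_lv : Codebook.lookup_values m' c = Codebook.lookup_values m c := by
    simp only [vacc, voff]
    exact hk.u32 _ (by simp only []; omega) (by simp only []; omega)
  have e_mu : Codebook.multiplicands m' c = Codebook.multiplicands m c := by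
    simp only [vacc, voff]
    exact hk.u64 _ (by simp only []; omega) (by simp only []; omega)
  have e_cw : Codebook.codewords m' c = Codebook.codewords m c := by
    simp only [vacc, voff]
    exact hk.u64 _ (by simp only []; omega) (by simp only []; omega)
  have e_sc : Codebook.sorted_codewords m' c = Codebook.sorted_codewords m c := by
    simp only [vacc, voff]
    exact hk.u64 _ (by simp only []; omega) (by simp only []; omega)
  have e_sv : Codebook.sorted_values m' c = Codebook.sorted_values m c := by
    simp only [vacc, voff]
    exact hk.u64 _ (by simp only []; omega) (by simp only []; omega)
  have e_se : Codebook.sorted_entries m' c = Codebook.sorted_entries m c := by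
    simp only [vacc, voff]
    exact hk.i32 _ (by simp only []; omega) (by simp only []; omega)
  refine ⟨e_dim, e_ent, e_cl, e_sp, e_se, e_cw, ?_⟩
  intro fr
  exact
    { lookup_type := by rw [e_lt]; exact fr.lookup_type
      lookup_values := by rw [e_lv]; exact fr.lookup_values
      multiplicands := by rw [e_mu]; exact fr.multiplicands
      sorted_codewords := by rw [e_sc]; exact fr.sorted_codewords
      sorted_values := by rw [e_sv]; exact fr.sorted_values }

/-- **THE EXIT `AtC7` OF SEGMENT C6e** (0x1146d2, both arms of `jae`): from `InC6e` at `v` with `rax ≠ 0` (the temp block P3 = `values`)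
and a later state `s` whose memory differs from `v.mem` only in windows `C6eWin` (the stack below rsp; `[f + 16, f + 20)` when the
`size` statistic was stored), no shadow byte, `r12 = rax` of `v`, `r14`, `rbx` kept: `Frame` and CUR(i) by `c6e_carry`, the struct
`cb(i)` and the bytes of `lengths` (the temp block P1) are kept, `Built` by `C6.built_sparse`. -/
theorem c6e_exit {u₀ : State} {g : Ghost} {i : Nat} {A2 A3 Ai Aw : Arena} {A : Arena × List Obj} {lengths : Nat} {v s : State}
    {ws : List Span} (h : InC6e u₀ g i A2 A3 Ai Aw A lengths v)
    (hs : Mem.SameExcept ws v.mem s.mem) (hun : ShadowUntouched v.mem s.mem) (hok : ∀ w, w ∈ ws → C6eWin g w)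
    (hrip : s.rip = pc_C7) (hrsp : s.reg .rsp = v.reg .rsp) (hcode : CodeOK u₀ s.mem) (hinv : abiInv s)
    (hr14 : s.reg .r14 = v.reg .r14) (hrbx : s.reg .rbx = v.reg .rbx) (hr12 : s.reg .r12 = v.reg .rax)
    (hne : ¬ v.reg .rax = 0) : AtC7 u₀ g i s := by
  have hfr := h.mid.frame
  have hcur := h.mid.cur
  have hpos : Pos g A := Pos.of hfr hcur
  have hm0 : MInv g i A2 A3 Ai A v.mem := MInv.of hfr hcur
  have hcw := hm0.c_where
  have p1 := hpos.r_eq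
  have p2 := hpos.ra_lo
  have p3 := hpos.ra_hi
  have p4 := hpos.f_lo
  have p5 := hpos.f_hi
  have p6 := hpos.f_stack
  have p7 := hpos.objOut
  have p9 := hpos.ar_lo
  have p10 := hpos.ar_hi
  have p11 := hpos.ar_stack
  have hT : TempsAre A.1
      [((v.reg .rax).toNat, 4 * (Codebook.sorted_entries v.mem (g.cb v.mem i)).toNat),
       (Codebook.codewords v.mem (g.cb v.mem i), 4 * (Codebook.sorted_entries v.mem (g.cb v.mem i)).toNat),
       (lengths, (Codebook.entries v.mem (g.cb v.mem i)).toNat)] := by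
    rcases h.res with h0 | hT
    · exact absurd h0 hne
    · exact hT
  -- the temp block P1 = `lengths`: inside the arena's buffer, off the stack
  have hTl : A.1.TBlock lengths (Codebook.entries v.mem (g.cb v.mem i)).toNat :=
    hT.tblock (List.mem_cons_of_mem _ (List.mem_cons_of_mem _ List.mem_cons_self))
  have hlr := hcur.sd.arena.tblock_range hTl
  have hlo := hcur.sd.arena.tblock_off hTl
  have hr8 := le_r8 (Codebook.entries v.mem (g.cb v.mem i)).toNat
  have hat := hcur.sd.arena.AR1
  have hokS : ∀ w, w ∈ ws → c6e_SpanOK g (g.cb v.mem i) w := by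
    intro w hw
    have k := hok w hw
    unfold C6eWin at k
    unfold c6e_SpanOK
    omega
  obtain ⟨hfr', hcur', hcb⟩ := c6e_carry hfr hcur hs hokS hun hrip (hrsp.trans hfr.rsp) hcode hinv hr14
  obtain ⟨c, hc⟩ : ∃ c, g.cb v.mem i = c := ⟨_, rfl⟩
  rw [hc] at hcw hT hTl hlr hlo hr8 hcb
  have hk : (⟨c, 2120⟩ : Block).Kept v.mem s.mem := by
    apply Block.Kept.of_sameExcept hs _ (by simp only []; omega)
    intro w hw
    have k := hok w hw
    unfold C6eWin at k
    simp only []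
    omega
  obtain ⟨e_dim, e_ent, e_cl, e_sp, e_se, e_cw, hfresh⟩ := c6e_fields hk
  have hlenE : Mem.EqOn lengths (lengths + (Codebook.entries v.mem c).toNat) v.mem s.mem := by
    apply hs.eqOn
    intro w hw
    have k := hok w hw
    unfold C6eWin at k
    omega
  have hlenI : lengths + (Codebook.entries v.mem c).toNat ≤ 2 ^ 64 := by omega
  have hk1 := h.mid.k1
  have hk2 := h.mid.k2
  have hsp1 := h.sparse1
  have hfr5 := h.mid.fresh
  have hlenL := h.mid.lenL
  have hsl := h.sparse_lengths
  have hcnt := h.cnt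
  rw [hc] at hk1 hk2 hsp1 hfr5 hlenL hsl hcnt
  refine ⟨A, lengths, (v.reg .rax).toNat, A2, A3, Ai, Aw, ?_⟩
  refine
    { frame := hfr'
      built := C6.built_sparse hcur' h.mid.extw h.mid.extw' ?_ ?_ (hrbx.trans h.mid.rbx) ?_ ?_ ?_ ?_ ?_ ?_ ?_ }
  · rw [hcb]
    exact ⟨by rw [e_dim]; exact hk1.dim_pos, by rw [e_dim]; exact hk1.dim_le, by rw [e_ent]; exact hk1.ent_nonneg,
      by rw [e_ent]; exact hk1.ent_lt⟩
  · rw [hcb]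
    exact
      { sparse_01 := by rw [e_sp]; exact hk2.sparse_01
        se_nonneg := by rw [e_se]; exact hk2.se_nonneg
        se_le := by rw [e_se, e_ent]; exact hk2.se_le
        sparse_pos := by rw [e_sp, e_se]; exact hk2.sparse_pos
        sparse_quarter := by rw [e_sp, e_se, e_ent]; exact hk2.sparse_quarter }
  · rw [hr12, Vorbis.addr_toNat]
  · rw [hcb, e_ent]
    exact hlenL.same hlenE hlenI
  · rw [hcb, e_sp]
    exact hsp1
  · rw [hcb, e_cl, e_se]
    exact hsl
  · rw [hcb, e_se, e_cw, e_ent]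
    exact hT
  · rw [hcb]
    unfold CNT at hcnt ⊢
    rw [e_ent, e_se, C7.usedCount_same hlenE hlenI]
    exact hcnt
  · rw [hcb]
    exact hfresh hfr5

/-- Segment C6e: from the return of the second `setup_temp_malloc(f, 4·sorted_entries)` (0x114969, `AtC6e`): `values = rax`; NULL → the
outofmem stub 0x114975 (`error(f, 3)`, `AtERR` by `C7.fail_exit`: no store before it); else the `size` statistic (the checked loads
of `c->entries` — `C7.cb_site` — and of `f->setup_temp_memory_required` — `Bits.site_field` —, the conditional store `[f + 16, f + 20)`)
and `AtC7` by `c6e_exit` on both arms of `jae`. -/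
theorem c6e_walk : Vorbis.Spec.start_decoder_C6e.Statement := by
  intro Lay hLay μ hμ u₀ hcode hld4 h_error
  intro g i v hat
  obtain ⟨A, lengths, A2, A3, Ai, Aw, h⟩ := hat
  have hfr := h.mid.frame
  have hhand := h.mid.cur.hand
  have he := hfr.entry
  v_entry he
  simp only [depth] at he_room he_stack
  have w_rip := hfr.rip
  have w_rsp := hfr.rsp
  have w_eq : Mem.EqOn Vorbis.L.textLo Vorbis.L.textHi u₀.mem v.mem := hfr.code
  have hdf : v.flags .df = false := (show abiInv _ from hfr.inv).1
  have hmx : v.mxcsr &&& 0x1F80 = 0x1F80 := (show abiInv _ from hfr.inv).2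
  have hsse := Vorbis.sseOK_of_abiInv hfr.inv
  obtain ⟨hR1, hR2⟩ := hfr.r_eq
  have eR : g.R = (g.e.reg .rsp).toNat - 1480 := rfl
  have eRA : g.RA = (g.e.reg .rsp).toNat := rfl
  have c_rsp : v.reg .rsp = g.e.reg .rsp - 1480 := by
    rw [w_rsp, eR, ← Vorbis.addr_sub_lit _ 1480 (by show (1480 : Nat) ≤ _; omega), Vorbis.addr_toNat]
  clear w_rsp
  have k_rsp := c_rsp
  have r_f : v.mem.readLE (g.e.reg .rsp - 1456) 8 = g.f := by
    have e : g.e.reg .rsp - 1456 = addr (g.R + 0x18) := by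
      have e1 : g.R + 0x18 = (g.e.reg .rsp).toNat - 1456 := by
        show (g.e.reg .rsp).toNat - 1480 + 0x18 = _
        omega
      rw [e1, ← Vorbis.addr_sub_lit _ 1456 (by show (1456 : Nat) ≤ _; omega), Vorbis.addr_toNat]
    rw [e]
    exact h.mid.cur.slot_f
  have hpos : Pos g A := Pos.of hfr h.mid.cur
  have hm0 : MInv g i A2 A3 Ai A v.mem := MInv.of hfr h.mid.cur
  have hcw := hm0.c_where
  obtain ⟨c, hc⟩ : ∃ c, g.cb v.mem i = c := ⟨_, rfl⟩
  have c_r14 := h.mid.cur.r14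
  rw [hc] at c_r14 hcw
  have hcT : (addr c).toNat = c := Vorbis.toNat_addr _ (by omega)
  have hfT : (addr g.f).toNat = g.f := Vorbis.toNat_addr _ (by
    have := hpos.f_hi
    omega)
  have hsub : ∀ o, o ∈ stackObjs g.frames ++ A.2 → o ∈ stackObjs g.frames' ++ A.2 := by
    intro o ho
    unfold Ghost.frames'
    rw [stackObjs_cons]
    rcases List.mem_append.mp ho with hs | ho'
    · exact List.mem_append_left _ (List.mem_append_right _ hs)
    · exact List.mem_append_right _ ho'
  have herr := h_error A.2 g.frames'
  have t1 : (g.e.reg .rsp - 1488).toNat = (g.e.reg .rsp).toNat - 1488 := by u_omega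
  have hfn : (UInt64.ofNat g.f).toNat = g.f := hfT
  u_walk hcode [hμ.vendor] until [pc_C7, pc_ERR] span [Vorbis.L.textLo, Vorbis.L.textHi] side (v_side)
  case check_1146a3 =>
    -- the load of `c->entries` (load4 at `c + 4`)
    have hun : ShadowUntouched v.mem s_1146a3.mem := by v_untouched
    have hsite := C7.cb_site h.mid.cur 4 4 (by omega) (by omega)
    rw [hc] at hsite
    apply Vorbis.Spec.check_site hfr.shadow hun hsite
    u_omega
  case check_1146c3 =>
    -- the load of `f->setup_temp_memory_required` (load4 at `f + 16`): a field of `*f`; it serves the store 0x1146ce too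
    have hun : ShadowUntouched v.mem s_1146c3.mem := by v_untouched
    have hsite := h.mid.cur.sd.bits.site_field h.mid.cur.sd.env.live 16 4 (by omega) (by omega) rfl
    apply Vorbis.Spec.check_site hfr.shadow hun hsite
    have p5 := hpos.f_hi
    u_omega
  case side_code =>
    -- the store `[f + 16]` is off the text: `*f` lies in the data space
    have p4 := hpos.f_lo
    have p5 := hpos.f_hi
    right
    u_omega
  case call_inv => v_inv
  case pre_114982 =>
    have hun : ShadowUntouched v.mem s_114982.mem := by v_untouched
    have hf' : (s_114982.reg .rdi).toNat = g.f := by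
      rw [w_rdi]
      exact hfn
    have hrs : (s_114982.reg .rsp).toNat + 8 = g.R := by
      rw [w_rsp, t1]
      omega
    refine ⟨⟨?_, hfr.offText⟩, ?_⟩
    · rw [hrs]
      exact hfr.shadow.untouched hun
    · rw [hf']
      exact hhand.obj.mono hsub
  case cont =>
    -- `jae` taken: `setup_temp_memory_required` is large enough; only the two pushed return addresses were written
    have hne : ¬ v.reg .rax = 0 := by
      intro h0
      rw [h0] at hbr_11496f
      exact hbr_11496f rfl
    have hsA : Mem.SameExcept [⟨g.R - 408, g.R⟩] v.mem s_1146cc.mem := by u_same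
    have hunA : ShadowUntouched v.mem s_1146cc.mem := by v_untouched
    have hokA : ∀ w, w ∈ [(⟨g.R - 408, g.R⟩ : Span)] → C6eWin g w := by
      intro w hw
      rw [List.mem_singleton.mp hw]
      unfold C6eWin
      simp only []
      omega
    have hrsp' : s_1146cc.reg .rsp = v.reg .rsp := by
      rw [w_rsp, c_rsp]
    exact ReachVia.done (Or.inl (c6e_exit h hsA hunA hokA w_rip hrsp' w_eq (by v_inv) (w_kept.get .r14 rfl)
      (w_kept.get .rbx rfl) w_r12 hne))
  case cont =>
    -- `jae` not taken: the store `f->setup_temp_memory_required = size`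
    have hne : ¬ v.reg .rax = 0 := by
      intro h0
      rw [h0] at hbr_11496f
      exact hbr_11496f rfl
    have p4 := hpos.f_lo
    have p5 := hpos.f_hi
    have hsA : Mem.SameExcept [⟨g.R - 408, g.R⟩, ⟨g.f + 16, g.f + 20⟩] v.mem s_1146ce.mem := by u_same
    have hunA : ShadowUntouched v.mem s_1146ce.mem := by v_untouched
    have hokA : ∀ w, w ∈ [(⟨g.R - 408, g.R⟩ : Span), ⟨g.f + 16, g.f + 20⟩] → C6eWin g w := by
      intro w hw
      simp only [List.mem_cons, List.mem_nil_iff, or_false] at hw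
      unfold C6eWin
      rcases hw with rfl | rfl <;> simp only [] <;> omega
    have hrsp' : s_1146ce.reg .rsp = v.reg .rsp := by
      rw [w_rsp, c_rsp]
    exact ReachVia.done (Or.inl (c6e_exit h hsA hunA hokA w_rip hrsp' w_eq (by v_inv) (w_kept.get .r14 rfl)
      (w_kept.get .rbx rfl) w_r12 hne))
  case cont =>
    -- `error(f, VORBIS_outofmem)` returned: the `jmp` to the epilogue, then `C7.fail_exit`
    v_after_call w_rsp_114982 w_mem_114982
    have hf : (s_114982.reg .rdi).toNat = g.f := by
      rw [w_rdi_114982]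
      exact hfn
    simp only [hf, t1] at w_same
    have hp : s_114982r.reg .rax = 0 ∧ ShadowUntouched s_114982.mem s_114982r.mem ∧
        s_114982r.mem.readLE (s_114982.reg .rdi + 140) 4 = (s_114982.reg .rsi).toNat % 2 ^ 32 := w_post
    have w_rax : s_114982r.reg .rax = 0 := hp.1
    u_walk hcode [hμ.vendor] until [pc_C7, pc_ERR] span [Vorbis.L.textLo, Vorbis.L.textHi] side (v_side)
    have hpush : Mem.SameExcept [⟨g.R - 408, g.R⟩] v.mem (v.mem.writeLE (g.e.reg .rsp - 1488) 8 1132935) := by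
      apply Mem.SameExcept.writeLE
      · rw [t1]
        omega
      · refine ⟨_, List.mem_cons_self, ?_, ?_⟩
        · show g.R - 408 ≤ _
          rw [t1]
          omega
        · show _ ≤ g.R
          rw [t1]
          omega
    have hs : Mem.SameExcept [⟨g.R - 408, g.R⟩, ⟨(g.e.reg .rsp).toNat - 1488 - 48, (g.e.reg .rsp).toNat - 1488⟩,
        ⟨g.f + 140, g.f + 140 + 4⟩] v.mem s_114987.mem := by
      rw [w_mem]
      refine (C7.sameExcept_weaken hpush ?_).trans (C7.sameExcept_weaken w_same ?_)
      · intro w hw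
        rw [List.mem_singleton.mp hw]
        exact List.mem_cons_self
      · intro w hw
        exact List.mem_cons_of_mem _ hw
    have hun1 : ShadowUntouched v.mem s_114982.mem := by
      rw [w_mem_114982]
      apply hpush.eqOn
      intro w hw
      rw [List.mem_singleton.mp hw]
      simp only
      omega
    have hsh : ShadowUntouched v.mem s_114987.mem := by
      rw [w_mem]
      exact Mem.EqOn.trans hun1 hp.2.1
    have hw : ∀ x, x ∈ [(⟨g.R - 408, g.R⟩ : Span), ⟨(g.e.reg .rsp).toNat - 1488 - 48, (g.e.reg .rsp).toNat - 1488⟩,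
        ⟨g.f + 140, g.f + 140 + 4⟩] → C7.FailWin g x := by
      intro x hx
      simp only [List.mem_cons, List.mem_nil_iff, or_false] at hx
      unfold C7.FailWin
      rcases hx with rfl | rfl | rfl <;> simp only [] <;> omega
    have hinv' : abiInv s_114987 := by
      refine Vorbis.abiInv_of ?_ ?_
      · rw [w_flags]
        exact w_df
      · rw [w_mxcsr]
        exact w_mx
    have hrsp' : s_114987.reg .rsp = v.reg .rsp := by
      rw [w_rsp, c_rsp]
    exact ReachVia.done (Or.inr (C7.fail_exit hfr h.mid.cur hs hsh hw w_rip hrsp' w_eq hinv' w_rax))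

end Vorbis.Spec.start_decoder_C6e

theorem Vorbis.Spec.Worked.start_decoder_C6e_ok : Vorbis.Spec.start_decoder_C6e.Statement := Vorbis.Spec.start_decoder_C6e.c6e_walk
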